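-- pv_equiv track=rewrite | github.com/Dixith400/python_practice | practice.py | unRepeted_sent
-- ===== SOURCE A (Python) =====
-- def unRepeted_sent(sentences):
--     no_of_each_Sentence= {}
--
--     for x in sentences:
--         no_of_each_Sentence[x] = no_of_each_Sentence.get(x, 0) + 1
--
--
--     for y in no_of_each_Sentence:
--         if no_of_each_Sentence[y] ==1 :
--             return y
--
--     return "no sentences like that "
-- ===== SOURCE B (Python) =====
-- def unRepeted_sent(sentences):
--     rest = list(sentences)
--     while rest:
--         head, tail = rest[0], rest[1:]
--         if head in tail:
--             rest = [x for x in tail if x != head]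
--         else:
--             return head
--     return "no sentences like that "
-- ===== Notes on version B (the rewrite author's own statement) =====
-- stated objective: alternative
-- what changed: B never counts anything: it peels the head, and if the head reappears in the tail it deletes all its occurrences and continues on the shrunken list, otherwise the head is the answer (elimination by filtering instead of building a count index).
import Mathlib
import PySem

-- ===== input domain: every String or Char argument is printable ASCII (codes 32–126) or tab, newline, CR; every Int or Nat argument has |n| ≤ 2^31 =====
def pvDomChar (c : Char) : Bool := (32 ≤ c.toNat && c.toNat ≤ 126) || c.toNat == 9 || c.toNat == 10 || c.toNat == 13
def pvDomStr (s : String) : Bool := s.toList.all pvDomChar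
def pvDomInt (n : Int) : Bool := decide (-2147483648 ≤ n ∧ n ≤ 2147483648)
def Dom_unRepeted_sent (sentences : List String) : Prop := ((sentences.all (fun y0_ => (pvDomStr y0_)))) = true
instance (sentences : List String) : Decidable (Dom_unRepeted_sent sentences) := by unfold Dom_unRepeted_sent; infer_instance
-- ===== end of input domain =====

-- B replaces A's count-dict-then-scan by elimination: peel the head; if it reappears in the
-- tail delete all its occurrences and continue, else the head is the answer. No counting at all.

-- ===== PORT A =====
-- first loop: d[x] = d.get(x, 0) + 1; second loop: first key y with d[y] == 1, else default
def unRepeted_sent (sentences : List String) : String :=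
  let d : PySem.Dict String Int :=
    sentences.foldl (fun d x => d.insert x (d.getD x 0 + 1)) PySem.Dict.empty
  match d.keys.find? (fun y => d.getD y 0 == 1) with
  | some y => y
  | none => "no sentences like that "

-- ===== PORT B =====
-- Source B's while loop: rest shrinks each round, becomes the structural recursion below
def unRepeted_sent_alt (sentences : List String) : String :=
  match sentences with
  | [] => "no sentences like that "
  | head :: tail =>
    if head ∈ tail then unRepeted_sent_alt (tail.filter (fun x => x ≠ head))
    else head
termination_by sentences.length
decreasing_by
  simp only [List.length_cons, List.length_unattach]
  exact Nat.lt_succ_of_le (le_trans (List.length_filter_le _ _) (by simp))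

-- ===== PRECONDITION & SPEC =====
def Spec_unRepeted_sent (sentences : List String) (out : String) : Prop := out = unRepeted_sent_alt sentences
instance (sentences : List String) (out : String) : Decidable (Spec_unRepeted_sent sentences out) := by unfold Spec_unRepeted_sent; infer_instance

-- ===== CLAIM (what is proved, stated in full; the proofs are below) =====
def Claim_equal_unRepeted_sent : Prop := ∀ (sentences : List String), Dom_unRepeted_sent sentences → Spec_unRepeted_sent sentences (unRepeted_sent sentences)

-- ===== LEMMAS AND PROOFS =====

-- the common normal form both ports are reduced to
def pvFirstUnique (l : List String) : String :=
  match l.find? (fun x => PySem.List.count l x == 1) with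
  | some x => x
  | none => "no sentences like that "

-- unattach commutes with filter on a predicate over the values (closes the attach form of the IH)
theorem pv_unattach_filter {α : Type} {P : α → Prop} (q : α → Bool) (lst : List {x // P x}) :
    (lst.filter (fun x => q x.1)).unattach = lst.unattach.filter q := by
  induction lst with
  | nil => rfl
  | cons a lst ih =>
    cases hq : q a.1 <;>
      simp [List.unattach_cons, hq, ih]

-- find? over a set built by folding add: the prefix s wins, otherwise the first match in l
theorem pv_find?_foldl_add {α : Type} [BEq α] [LawfulBEq α] (p : α → Bool) (l : List α) :
    ∀ s : List α, List.find? p (l.foldl PySem.Set.add s) =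
      (List.find? p s).orElse (fun _ => List.find? p l) := by
  induction l with
  | nil => intro s; cases h : List.find? p s <;> simp [Option.orElse, h]
  | cons x l ih =>
    intro s
    rw [List.foldl_cons, ih]
    show ((List.find? p (PySem.Set.add s x)).orElse fun _ => List.find? p l) = _
    unfold PySem.Set.add
    by_cases hc : PySem.Set.contains s x
    · simp only [hc, if_pos]
      cases hs : List.find? p s with
      | some a => simp [Option.orElse]
      | none =>
        have hx : x ∈ s := by simpa [PySem.Set.contains] using hc
        have hpx : p x = false := by
          have := List.find?_eq_none.mp hs x hx
          simpa using this
        simp [Option.orElse, hpx]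
    · simp only [hc, Bool.false_eq_true, if_false]
      rw [List.find?_append]
      cases hs : List.find? p s with
      | some a => simp [Option.orElse]
      | none => cases hpx : p x <;> simp [Option.orElse, hpx]

theorem pv_find?_ofList {α : Type} [BEq α] [LawfulBEq α] (p : α → Bool) (l : List α) :
    List.find? p (PySem.Set.ofList l) = List.find? p l := by
  rw [PySem.Set.ofList_eq_foldl, pv_find?_foldl_add]
  simp [Option.orElse]

-- A's port computes the first element of l whose count in l is 1
theorem pv_A_eq_firstUnique (l : List String) : unRepeted_sent l = pvFirstUnique l := by
  unfold unRepeted_sent pvFirstUnique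
  simp only [PySem.Dict.foldl_insert_getD_add_one_eq_counter, PySem.Dict.keys_counter]
  have hp : (fun y => (PySem.Dict.counter l).getD y 0 == 1)
      = (fun x => PySem.List.count l x == 1) := by
    funext y
    rw [PySem.Dict.getD_counter, PySem.List.count_eq]
    simp
  rw [hp, pv_find?_ofList]

-- find? is preserved by filtering, when p is false on the filtered-out elements
-- and p agrees with p' on the kept ones
theorem pv_find?_filter {α : Type} (p p' : α → Bool) (q : α → Bool) (t : List α)
    (h₀ : ∀ x ∈ t, q x = false → p x = false)
    (h₁ : ∀ x ∈ t, q x = true → p x = p' x) :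
    List.find? p t = List.find? p' (t.filter q) := by
  induction t with
  | nil => simp
  | cons a t ih =>
    have ih' := ih (fun x hx => h₀ x (List.mem_cons_of_mem a hx))
      (fun x hx => h₁ x (List.mem_cons_of_mem a hx))
    cases hq : q a with
    | false =>
      have hpa := h₀ a List.mem_cons_self hq
      simp [hq, hpa, ih']
    | true =>
      have hpa := h₁ a List.mem_cons_self hq
      simp only [List.filter_cons, hq, if_pos, List.find?_cons, hpa]
      cases hp' : p' a
      · simpa [hp'] using ih'
      · simp

-- B's port also computes the first element whose count is 1 (elimination is count-preserving)
theorem pv_B_eq_firstUnique (l : List String) : unRepeted_sent_alt l = pvFirstUnique l := by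
  induction l using unRepeted_sent_alt.induct with
  | case1 => simp [unRepeted_sent_alt, pvFirstUnique]
  | case2 head tail hmem ih =>
    rw [pv_unattach_filter (fun x => decide (x ≠ head)) tail.attach, List.unattach_attach] at ih
    rw [unRepeted_sent_alt, if_pos hmem, ih]
    unfold pvFirstUnique
    have hph : (PySem.List.count (head :: tail) head == 1) = false := by
      have h1 : 1 ≤ tail.count head := List.one_le_count_iff.mpr hmem
      simp only [PySem.List.count_eq, List.count_cons_self, beq_eq_false_iff_ne, ne_eq]
      omega
    rw [List.find?_cons, hph]
    rw [pv_find?_filter (fun x => PySem.List.count (head :: tail) x == 1)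
        (fun x => PySem.List.count (tail.filter (fun x => x ≠ head)) x == 1)
        (fun x => x ≠ head) tail]
    · intro x _ hq
      have hx : x = head := by simpa using hq
      subst hx; exact hph
    · intro x _ hq
      have hx : x ≠ head := by simpa using hq
      have hxs : head ≠ x := fun h => hx h.symm
      simp [PySem.List.count_eq, List.count_filter, hx, hxs]
  | case3 head tail hmem =>
    rw [unRepeted_sent_alt, if_neg hmem]
    unfold pvFirstUnique
    have hph : (PySem.List.count (head :: tail) head == 1) = true := by
      simp [PySem.List.count_eq, List.count_cons_self, List.count_eq_zero_of_not_mem hmem]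
    rw [List.find?_cons, hph]

-- ===== VERDICT (by name: the statement is the Claim_ definition above) =====
theorem unRepeted_sent_spec : Claim_equal_unRepeted_sent := by
  intro sentences _
  unfold Spec_unRepeted_sent
  rw [pv_A_eq_firstUnique, pv_B_eq_firstUnique]
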